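-- pv_equiv track=rewrite | github.com/take-works-tech/arc-agi2-arc2025 | src/hybrid_system/inference/program_synthesis/candidate_generators/common_helpers.py | get_background_color
-- ===== SOURCE A (Python) =====
-- from typing import List, Dict, Any, Optional, Tuple
-- from collections import Counter
--
-- def get_background_color(grid: List[List[int]], use_edge_heuristic: bool = False) -> int:
--     """グリッドの背景色を取得（共通実装、改善版）
--
--     Args:
--         grid: グリッド
--         use_edge_heuristic: エッジ色を考慮するか（デフォルト: False、シンプルな実装）
--
--     Returns:
--         背景色（通常は0）
--     """
--     if is_empty_grid(grid):
--         return 0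
--
--     flat_colors = [c for row in grid for c in row]
--     if not flat_colors:
--         return 0
--
--     counter = Counter(flat_colors)
--     # 最頻出色を基本候補とする
--     most_common_color, _ = max(counter.items(), key=lambda kv: (kv[1], -kv[0]))
--
--     if use_edge_heuristic:
--         # エッジ色を考慮（より詳細な実装）
--         edge_colors = _get_edge_colors(grid)
--         if edge_colors:
--             edge_color_counts = Counter(edge_colors)
--             most_common_edge_color = edge_color_counts.most_common(1)[0][0]
--             # エッジ色と最頻出色が一致する場合、信頼度が高い
--             if most_common_edge_color == most_common_color:
--                 return int(most_common_color)
--             else: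
--                 # エッジ色を優先（背景色はエッジに多く出現する可能性が高い）
--                 return int(most_common_edge_color)
--
--     # シンプルな実装: 最頻出色を返す（同率の場合は数値が小さいものを優先）
--     return int(most_common_color)
--
-- def _get_edge_colors(grid: List[List[int]]) -> List[int]:
--     """グリッドのエッジ色を取得（内部ヘルパー関数）
--
--     Args:
--         grid: グリッド
--
--     Returns:
--         エッジ色のリスト
--     """
--     if is_empty_grid(grid):
--         return []
--
--     h, w = get_grid_size(grid)
--     edge_colors = []
--
--     # 上端と下端
--     edge_colors.extend(grid[0])
--     if h > 1:
--         edge_colors.extend(grid[h - 1])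
--
--     # 左端と右端
--     for i in range(h):
--         edge_colors.append(grid[i][0])
--         if w > 1:
--             edge_colors.append(grid[i][w - 1])
--
--     return edge_colors
--
-- def is_empty_grid(grid: List[List[int]]) -> bool:
--     """グリッドが空かチェック
--
--     Args:
--         grid: グリッド
--
--     Returns:
--         空の場合True
--     """
--     return not grid or not grid[0] or len(grid) == 0 or len(grid[0]) == 0
--
-- def get_grid_size(grid: List[List[int]]) -> tuple[int, int]:
--     """グリッドサイズを取得
--
--     Args:
--         grid: グリッド
--
--     Returns:
--         (height, width) のタプル
--     """
--     if is_empty_grid(grid):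
--         return (0, 0)
--     return (len(grid), len(grid[0]))
-- ===== SOURCE B (Python) =====
-- def get_background_color(grid, use_edge_heuristic=False):
--     """Background color: most frequent color (smallest on ties); with the edge
--     heuristic, the first-seen most frequent edge color."""
--     if not grid or not grid[0]:
--         return 0
--     if use_edge_heuristic:
--         h, w = len(grid), len(grid[0])
--         edge = list(grid[0]) + (list(grid[-1]) if h > 1 else [])
--         for row in grid:
--             edge.append(row[0])
--             if w > 1:
--                 edge.append(row[w - 1])
--         # max with no counter: first element of edge whose total count is maximal,
--         # which is exactly Counter(edge).most_common(1)'s first-seen tie-break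
--         return max(edge, key=edge.count)
--     # no Counter: sort the colors and find the longest run in one scan;
--     # strict improvement on an ascending list keeps the smallest color on ties
--     flat = sorted(c for row in grid for c in row)
--     best, best_n = flat[0], 0
--     run_val, run_len = flat[0], 0
--     for c in flat:
--         if c == run_val:
--             run_len += 1
--         else:
--             run_val, run_len = c, 1
--         if run_len > best_n:
--             best, best_n = run_val, run_len
--     return best
-- ===== Notes on version B (the rewrite author's own statement) =====
-- stated objective: alternative
-- what changed: Drops Counter entirely: the main mode is found by sorting the flattened colors and scanning once for the longest consecutive run (strict improvement on an ascending list gives the smallest color on ties), and the edge branch returns max(edge, key=edge.count), whose first-maximal scan order equals Counter.most_common(1)'s first-seen tie-break; the redundant mce==mcc comparison disappears since both of A's branches return the edge value.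
import Mathlib
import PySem

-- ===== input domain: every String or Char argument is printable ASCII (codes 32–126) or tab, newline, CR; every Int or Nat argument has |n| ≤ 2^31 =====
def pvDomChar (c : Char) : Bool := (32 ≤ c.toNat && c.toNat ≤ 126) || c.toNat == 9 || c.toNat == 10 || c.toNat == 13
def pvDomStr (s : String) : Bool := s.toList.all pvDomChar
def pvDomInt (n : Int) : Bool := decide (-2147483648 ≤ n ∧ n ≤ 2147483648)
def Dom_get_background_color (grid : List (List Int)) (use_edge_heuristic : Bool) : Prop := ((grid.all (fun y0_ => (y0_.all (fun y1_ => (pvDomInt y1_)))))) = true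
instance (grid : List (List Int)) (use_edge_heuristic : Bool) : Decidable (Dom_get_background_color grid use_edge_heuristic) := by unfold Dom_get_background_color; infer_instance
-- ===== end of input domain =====

-- B drops Counter entirely: the main mode is a longest-run scan over the sorted colors
-- (strict improvement keeps the smallest color on ties) and the edge branch is
-- max(edge, key=edge.count), the first element of edge with maximal count (objective: alternative).

-- ===== PORT A =====
-- is_empty_grid: `not grid or not grid[0] or len(grid) == 0 or len(grid[0]) == 0`
def pv_is_empty_grid (grid : List (List Int)) : Bool :=
  match grid with
  | [] => true
  | r0 :: rest => r0.isEmpty || decide ((r0 :: rest).length = 0) || decide (r0.length = 0)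

-- get_grid_size
def pv_get_grid_size (grid : List (List Int)) : Int × Int :=
  if pv_is_empty_grid grid then (0, 0)
  else ((grid.length : Int), ((grid.headD []).length : Int))

-- loop body of `for i in range(h)` in _get_edge_colors; the pyGetD defaults are
-- unreachable on inputs admitted by Pre_ (indices in range there)
def pv_edge_row_step (w : Int) (acc : List Int) (row : List Int) : List Int :=
  let acc := acc ++ [PySem.List.pyGetD row 0 0]
  if w > 1 then acc ++ [PySem.List.pyGetD row (w - 1) 0] else acc

-- _get_edge_colors
def pv_get_edge_colors (grid : List (List Int)) : List Int :=
  if pv_is_empty_grid grid then []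
  else
    let hw := pv_get_grid_size grid
    let h := hw.1
    let w := hw.2
    let edge := ([] : List Int) ++ grid.headD []
    let edge := if h > 1 then edge ++ PySem.List.pyGetD grid (h - 1) [] else edge
    (PySem.List.pyRange 0 h).foldl (fun acc i => pv_edge_row_step w acc (PySem.List.pyGetD grid i [])) edge

def get_background_color (grid : List (List Int)) (use_edge_heuristic : Bool) : Int :=
  if pv_is_empty_grid grid then 0
  else
    let flat_colors := grid.foldl (fun acc row => acc ++ row) []
    if flat_colors.isEmpty then 0
    else
      let counter := PySem.Dict.counter flat_colors
      -- max(counter.items(), key=lambda kv: (kv[1], -kv[0])); the .getD default is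
      -- unreachable (items nonempty here)
      let mcc := ((PySem.List.max2? counter.items (fun kv => kv.2) (fun kv => -kv.1)).getD (0, 0)).1
      if use_edge_heuristic then
        let edge_colors := pv_get_edge_colors grid
        if !edge_colors.isEmpty then
          let edge_counts := PySem.Dict.counter edge_colors
          -- most_common(1)[0][0]: the first item (in insertion order) whose count is
          -- maximal — exactly PySem.List.max? (first extremal) on the items
          let mce := ((PySem.List.max? edge_counts.items (fun kv => kv.2)).getD (0, 0)).1
          if mce = mcc then mcc else mce
        else mcc
      else mcc

-- ===== PORT B =====
-- the run-scan loop body: `if c == run_val: run_len += 1 else: run_val, run_len = c, 1;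
-- if run_len > best_n: best, best_n = run_val, run_len`; state (best, best_n, run_val, run_len)
def pv_run_step (st : Int × Int × Int × Int) (c : Int) : Int × Int × Int × Int :=
  let rv := if c = st.2.2.1 then st.2.2.1 else c
  let rl := if c = st.2.2.1 then st.2.2.2 + 1 else 1
  if rl > st.2.1 then (rv, rl, rv, rl) else (st.1, st.2.1, rv, rl)

def get_background_color_alt (grid : List (List Int)) (use_edge_heuristic : Bool) : Int :=
  match grid with
  | [] => 0
  | r0 :: rest =>
    if r0.isEmpty then 0
    else if use_edge_heuristic then
      let w := (r0.length : Int)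
      -- the pyGetD defaults are unreachable on inputs admitted by Pre_
      let edge := r0 ++ (if ((r0 :: rest).length : Int) > 1 then PySem.List.pyGetD (r0 :: rest) (-1) [] else [])
      let edge := (r0 :: rest).foldl (fun acc row =>
        let acc := acc ++ [PySem.List.pyGetD row 0 0]
        if w > 1 then acc ++ [PySem.List.pyGetD row (w - 1) 0] else acc) edge
      -- max(edge, key=edge.count)
      (PySem.List.max? edge (fun c => (edge.count c : Int))).getD 0
    else
      let flat := PySem.List.sorted ((r0 :: rest).foldl (fun acc row => acc ++ row) []) (fun x => x)
      (flat.foldl pv_run_step (flat.headD 0, 0, flat.headD 0, 0)).1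

-- ===== PRECONDITION & SPEC =====
-- Pre_ excludes exactly the inputs where A raises IndexError: with the edge heuristic on
-- a non-empty grid, a row shorter than the first row makes grid[i][0]/grid[i][w-1] raise
-- (B raises identically there).
def Pre_get_background_color (grid : List (List Int)) (use_edge_heuristic : Bool) : Prop :=
  use_edge_heuristic = true →
    grid = [] ∨ grid.headD [] = [] ∨ ∀ row ∈ grid, (grid.headD []).length ≤ row.length
instance (grid : List (List Int)) (use_edge_heuristic : Bool) : Decidable (Pre_get_background_color grid use_edge_heuristic) := by unfold Pre_get_background_color; infer_instance

def pvWitness_get_background_color : List (List Int) × Bool := ([[1, 2], [2, 1]], true)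

def Spec_get_background_color (grid : List (List Int)) (use_edge_heuristic : Bool) (out : Int) : Prop := out = get_background_color_alt grid use_edge_heuristic
instance (grid : List (List Int)) (use_edge_heuristic : Bool) (out : Int) : Decidable (Spec_get_background_color grid use_edge_heuristic out) := by unfold Spec_get_background_color; infer_instance

-- ===== CLAIM (what is proved, stated in full; the proofs are below) =====
def Claim_equal_get_background_color : Prop := ∀ (grid : List (List Int)) (use_edge_heuristic : Bool), Dom_get_background_color grid use_edge_heuristic → Pre_get_background_color grid use_edge_heuristic → Spec_get_background_color grid use_edge_heuristic (get_background_color grid use_edge_heuristic)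

-- ===== LEMMAS AND PROOFS =====

lemma pv_max2_aux {α : Type} (k1 k2 : α → Int) :
    ∀ (xs : List α) (a : α), ∃ m,
      xs.foldl (fun acc x =>
          match acc with
          | none => some x
          | some m =>
            if (decide (k1 m < k1 x) || !decide (k1 x < k1 m) && decide (k2 m < k2 x)) = true
            then some x else some m) (some a) = some m ∧
      (m = a ∨ m ∈ xs) ∧
      (k1 a < k1 m ∨ (k1 a = k1 m ∧ k2 a ≤ k2 m)) ∧
      ∀ y ∈ xs, k1 y < k1 m ∨ (k1 y = k1 m ∧ k2 y ≤ k2 m) := by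
  intro xs
  induction xs with
  | nil => intro a; exact ⟨a, rfl, Or.inl rfl, Or.inr ⟨rfl, le_refl _⟩, by simp⟩
  | cons x t ih =>
    intro a
    simp only [List.foldl_cons]
    by_cases hc : (decide (k1 a < k1 x) || !decide (k1 x < k1 a) && decide (k2 a < k2 x)) = true
    · simp only [hc, if_true]
      obtain ⟨m, hm, hmem, hle, hall⟩ := ih x
      refine ⟨m, hm, ?_, ?_, ?_⟩
      · rcases hmem with h | h
        · exact Or.inr (by simp [h])
        · exact Or.inr (by simp [h])
      · simp only [Bool.or_eq_true, Bool.and_eq_true, decide_eq_true_eq, Bool.not_eq_true',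
          decide_eq_false_iff_not] at hc
        rcases hc with h1 | ⟨h2, h3⟩
        · rcases hle with h | ⟨he, _⟩
          · exact Or.inl (lt_trans h1 h)
          · exact Or.inl (he ▸ h1)
        · have hax : k1 a = k1 x ∨ k1 a < k1 x := by
            rcases lt_trichotomy (k1 a) (k1 x) with h | h | h
            · exact Or.inr h
            · exact Or.inl h
            · exact absurd h h2
          rcases hax with he | hlt
          · rcases hle with h | ⟨he2, hk2⟩
            · exact Or.inl (he ▸ h)
            · exact Or.inr ⟨he.trans he2, le_trans (le_of_lt h3) hk2⟩
          · rcases hle with h | ⟨he2, _⟩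
            · exact Or.inl (lt_trans hlt h)
            · exact Or.inl (he2 ▸ hlt)
      · intro y hy
        rcases List.mem_cons.mp hy with rfl | hy
        · rcases hle with h | h
          · exact Or.inl h
          · exact Or.inr h
        · exact hall y hy
    · simp only [hc]
      obtain ⟨m, hm, hmem, hle, hall⟩ := ih a
      refine ⟨m, hm, ?_, hle, ?_⟩
      · rcases hmem with h | h
        · exact Or.inl h
        · exact Or.inr (List.mem_cons_of_mem _ h)
      · intro y hy
        rcases List.mem_cons.mp hy with rfl | hy
        · simp only [Bool.or_eq_true, Bool.and_eq_true, decide_eq_true_eq, Bool.not_eq_true',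
            decide_eq_false_iff_not] at hc
          rw [not_or] at hc
          obtain ⟨h1, h2⟩ := hc
          rw [not_and_or] at h2
          by_cases hxa : k1 y < k1 a
          · rcases hle with h | ⟨he, _⟩
            · exact Or.inl (lt_trans hxa h)
            · exact Or.inl (he ▸ hxa)
          · have he : k1 y = k1 a := le_antisymm (not_lt.mp h1) (not_lt.mp hxa)
            have hk2 : k2 y ≤ k2 a := by
              rcases h2 with h2 | h2
              · exact absurd (not_not.mp h2) hxa
              · exact not_lt.mp h2
            rcases hle with h | ⟨he2, hk2'⟩
            · exact Or.inl (he ▸ h)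
            · exact Or.inr ⟨he.trans he2, le_trans hk2 hk2'⟩
        · exact hall y hy

lemma pv_max2_spec {α : Type} (k1 k2 : α → Int) (x : α) (t : List α) :
    ∃ m, PySem.List.max2? (x :: t) k1 k2 = some m ∧ m ∈ x :: t ∧
      ∀ y ∈ x :: t, k1 y < k1 m ∨ (k1 y = k1 m ∧ k2 y ≤ k2 m) := by
  obtain ⟨m, hm, hmem, hle, hall⟩ := pv_max2_aux k1 k2 t x
  refine ⟨m, ?_, ?_, ?_⟩
  · simpa [PySem.List.max2?] using hm
  · rcases hmem with rfl | h
    · exact List.mem_cons_self ..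
    · exact List.mem_cons_of_mem _ h
  · intro y hy
    rcases List.mem_cons.mp hy with rfl | hy
    · rcases hle with h | h
      · exact Or.inl h
      · exact Or.inr h
    · exact hall y hy

lemma pv_max?_map' {α β : Type} (g : α → β) (key : β → Int) (xs : List α) :
    PySem.List.max? (xs.map g) key = Option.map g (PySem.List.max? xs (fun x => key (g x))) := by
  have aux : ∀ (xs : List α) (acc : Option α),
      (xs.map g).foldl (fun acc x =>
          match acc with
          | none => some x
          | some m => if key m < key x then some x else some m) (Option.map g acc) =
      Option.map g (xs.foldl (fun acc x =>
          match acc with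
          | none => some x
          | some m => if key (g m) < key (g x) then some x else some m) acc) := by
    intro xs
    induction xs with
    | nil => intro acc; simp
    | cons x t ih =>
      intro acc
      simp only [List.map_cons, List.foldl_cons]
      cases acc with
      | none => exact ih (some x)
      | some m =>
        simp only [Option.map_some]
        by_cases h : key (g m) < key (g x)
        · simp only [h, if_true]; exact ih (some x)
        · simp only [h, if_false]; exact ih (some m)
  simpa [PySem.List.max?] using aux xs none

-- max? ignores duplicates after the first occurrence: max? over the ordered dedup
-- (PySem.Set.ofList) equals max? over the list itself

lemma pv_max?_append_singleton {α : Type} (f : α → Int) (l : List α) (x : α) :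
    PySem.List.max? (l ++ [x]) f =
      match PySem.List.max? l f with
      | none => some x
      | some m => if f m < f x then some x else some m := by
  simp only [PySem.List.max?, List.foldl_append]
  rfl

lemma pv_max?_ofList (f : Int → Int) (l : List Int) :
    PySem.List.max? (PySem.Set.ofList l) f = PySem.List.max? l f := by
  induction l using List.reverseRecOn with
  | nil => rfl
  | append_singleton l x ih =>
    have hof : PySem.Set.ofList (l ++ [x]) = PySem.Set.add (PySem.Set.ofList l) x := by
      rw [PySem.Set.ofList_eq_foldl, PySem.Set.ofList_eq_foldl, List.foldl_append]
      rfl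
    by_cases hx : x ∈ l
    · have hc : PySem.Set.contains (PySem.Set.ofList l) x = true := by
        rw [PySem.Set.contains_iff, PySem.Set.mem_ofList]; exact hx
      have hadd : PySem.Set.add (PySem.Set.ofList l) x = PySem.Set.ofList l := by
        simp [PySem.Set.add]; exact hx
      rw [hof, hadd, ih, pv_max?_append_singleton]
      obtain ⟨m, hm⟩ : ∃ m, PySem.List.max? l f = some m := by
        cases h : PySem.List.max? l f with
        | none => exact absurd ((PySem.List.max?_eq_none_iff _ _).mp h) (List.ne_nil_of_mem hx)
        | some m => exact ⟨m, rfl⟩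
      have hle : ¬ f m < f x := not_lt.mpr (PySem.List.max?_isMax hm x hx)
      rw [hm]; simp [hle]
    · have hc : PySem.Set.contains (PySem.Set.ofList l) x = false := by
        rw [Bool.eq_false_iff]; intro hcon
        exact hx ((PySem.Set.mem_ofList l x).mp ((PySem.Set.contains_iff _ _).mp hcon))
      have hadd : PySem.Set.add (PySem.Set.ofList l) x = PySem.Set.ofList l ++ [x] := by
        simp [PySem.Set.add]; exact hx
      rw [hof, hadd, pv_max?_append_singleton, pv_max?_append_singleton, ih]

-- run-scan characterization on an ascending list
lemma pv_count_append_singleton (l : List Int) (c x : Int) :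
    (l ++ [c]).count x = l.count x + (if x = c then 1 else 0) := by
  simp only [List.count_append, List.count_cons, List.count_nil, beq_iff_eq, Nat.zero_add]
  by_cases h : x = c
  · rw [if_pos h, if_pos h.symm]
  · rw [if_neg h, if_neg (fun hh => h hh.symm)]

lemma pv_run_spec : ∀ (s : List Int) (a : Int), s.Pairwise (· ≤ ·) → s ≠ [] →
    ∃ b n rv rl, s.foldl pv_run_step (a, 0, a, 0) = (b, n, rv, rl) ∧
      rv ∈ s ∧ (∀ x ∈ s, x ≤ rv) ∧ rl = (s.count rv : Int) ∧
      b ∈ s ∧ n = (s.count b : Int) ∧ rl ≤ n ∧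
      ∀ d ∈ s, (s.count d : Int) ≤ n ∧ ((s.count d : Int) = n → b ≤ d) := by
  intro s
  induction s using List.reverseRecOn with
  | nil => intro a _ h; exact absurd rfl h
  | append_singleton l c ih =>
    intro a hp _
    have hpl : l.Pairwise (· ≤ ·) := (List.pairwise_append.mp hp).1
    have hlec : ∀ x ∈ l, x ≤ c := fun x hx =>
      (List.pairwise_append.mp hp).2.2 x hx c (List.mem_singleton_self c)
    rw [List.foldl_append]
    have hcnt : ∀ x : Int, (l ++ [c]).count x = l.count x + (if x = c then 1 else 0) :=
      fun x => pv_count_append_singleton l c x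
    cases hl : l with
    | nil =>
      subst hl
      refine ⟨c, 1, c, 1, ?_, by simp, ?_, by simp, by simp, by simp, le_refl _, ?_⟩
      · simp only [List.foldl_nil]
        by_cases hc : c = a <;> simp [pv_run_step, hc]
      · intro x hx
        simp only [List.nil_append, List.mem_singleton] at hx
        subst hx; exact le_refl _
      · intro d hd
        simp only [List.nil_append, List.mem_singleton] at hd
        subst hd
        refine ⟨by simp, fun _ => le_refl _⟩
    | cons y t =>
      rw [← hl]
      have hlne : l ≠ [] := by rw [hl]; simp
      obtain ⟨b, n, rv, rl, heq, hrvmem, hrvmax, hrl, hbmem, hn, hrln, hall⟩ := ih a hpl hlne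
      rw [heq]
      by_cases hcrv : c = rv
      · by_cases hgt : rl + 1 > n
        · refine ⟨rv, rl + 1, rv, rl + 1, ?_, List.mem_append_left _ hrvmem, ?_, ?_,
            List.mem_append_left _ hrvmem, ?_, le_refl _, ?_⟩
          · simp [pv_run_step, hcrv, hgt]
          · intro x hx
            rcases List.mem_append.mp hx with hx | hx
            · exact hrvmax x hx
            · simp only [List.mem_singleton] at hx; subst hx; exact le_of_eq hcrv
          · rw [hcnt rv, if_pos hcrv.symm]; push_cast; omega
          · rw [hcnt rv, if_pos hcrv.symm]; push_cast; omega
          · intro d hd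
            by_cases hdrv : d = rv
            · subst hdrv
              rw [hcnt d, if_pos hcrv.symm]
              exact ⟨by push_cast; omega, fun _ => le_refl _⟩
            · have hdc : d ≠ c := fun h => hdrv (h.trans hcrv)
              have hdl : d ∈ l := by
                rcases List.mem_append.mp hd with h | h
                · exact h
                · simp only [List.mem_singleton] at h; exact absurd h hdc
              have h1 := hall d hdl
              rw [hcnt d, if_neg hdc]
              exact ⟨by push_cast; omega, fun hh => absurd hh (by push_cast; omega)⟩
        · have hbrv : b ≠ rv := by
            intro h
            have h1 := hall rv hrvmem
            rw [h] at hn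
            omega
          have hbc : b ≠ c := fun h => hbrv (h.trans hcrv)
          refine ⟨b, n, rv, rl + 1, ?_, List.mem_append_left _ hrvmem, ?_, ?_,
            List.mem_append_left _ hbmem, ?_, by omega, ?_⟩
          · simp [pv_run_step, hcrv, hgt]
          · intro x hx
            rcases List.mem_append.mp hx with hx | hx
            · exact hrvmax x hx
            · simp only [List.mem_singleton] at hx; subst hx; exact le_of_eq hcrv
          · rw [hcnt rv, if_pos hcrv.symm]; push_cast; omega
          · rw [hcnt b, if_neg hbc]; push_cast; omega
          · intro d hd
            by_cases hdrv : d = rv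
            · subst hdrv
              rw [hcnt d, if_pos hcrv.symm]
              exact ⟨by push_cast; omega, fun _ => hrvmax b hbmem⟩
            · have hdc : d ≠ c := fun h => hdrv (h.trans hcrv)
              have hdl : d ∈ l := by
                rcases List.mem_append.mp hd with h | h
                · exact h
                · simp only [List.mem_singleton] at h; exact absurd h hdc
              have h1 := hall d hdl
              rw [hcnt d, if_neg hdc]
              exact ⟨by push_cast; omega, fun hh => h1.2 (by push_cast at hh ⊢; omega)⟩
      · have hcl : c ∉ l := fun hcin =>
          hcrv (le_antisymm (hrvmax c hcin) (hlec rv hrvmem))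
        have hrvpos : 1 ≤ l.count rv := List.count_pos_iff.mpr hrvmem
        have hngt : ¬ ((1:Int) > n) := by omega
        have hbc : b ≠ c := fun h => hcl (h ▸ hbmem)
        refine ⟨b, n, c, 1, ?_, List.mem_append_right _ (List.mem_singleton_self c), ?_, ?_,
          List.mem_append_left _ hbmem, ?_, by omega, ?_⟩
        · simp [pv_run_step, hcrv, hngt]
        · intro x hx
          rcases List.mem_append.mp hx with hx | hx
          · exact hlec x hx
          · simp only [List.mem_singleton] at hx; subst hx; exact le_refl _
        · rw [hcnt c, if_pos rfl, List.count_eq_zero_of_not_mem hcl]; simp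
        · rw [hcnt b, if_neg hbc]; push_cast; omega
        · intro d hd
          by_cases hdc : d = c
          · subst hdc
            rw [hcnt d, if_pos rfl, List.count_eq_zero_of_not_mem hcl]
            exact ⟨by push_cast; omega, fun _ => hlec b hbmem⟩
          · have hdl : d ∈ l := by
              rcases List.mem_append.mp hd with h | h
              · exact h
              · simp only [List.mem_singleton] at h; exact absurd h hdc
            have h1 := hall d hdl
            rw [hcnt d, if_neg hdc]
            exact ⟨by push_cast; omega, fun hh => h1.2 (by push_cast at hh ⊢; omega)⟩

lemma pv_last_idx {α : Type} (xs : List α) (d : α) (h : xs ≠ []) :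
    PySem.List.pyGetD xs ((xs.length : Int) - 1) d = PySem.List.pyGetD xs (-1) d := by
  have hl : 0 < xs.length := List.length_pos_iff.mpr h
  have c1 : (0:Int) ≤ (xs.length:Int) - 1 := by omega
  have c2 : (xs.length:Int) - 1 < (xs.length:Int) := by omega
  have c3 : ¬ (0:Int) ≤ -1 := by omega
  have c4 : -(xs.length:Int) ≤ -1 := by omega
  simp only [PySem.List.pyGetD, PySem.List.pyGet?, PySem.List.pyIdx?, if_pos c1, if_pos c2,
    if_neg c3, if_pos c4]
  have : ((xs.length:Int) - 1).toNat = xs.length - (-(-1:Int)).toNat := by omega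
  rw [this]

lemma pv_flat_ne {r0 : List Int} {rest : List (List Int)} (h : r0 ≠ []) :
    (r0 :: rest).foldl (fun acc row => acc ++ row) ([] : List Int) ≠ [] := by
  rw [PySem.List.foldl_append_eq_flatMap (fun r => r)]
  simp only [List.nil_append, List.flatMap_cons]
  intro hcon
  exact h (List.append_eq_nil_iff.mp hcon).1

-- main branch: A's lex-max over Counter items = B's longest-run scan over the sorted colors
lemma pv_main_color (flat : List Int) (hfne : flat ≠ []) :
    ((PySem.List.max2? (PySem.Dict.counter flat).items (fun kv => kv.2) (fun kv => -kv.1)).getD (0, 0)).1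
    = ((PySem.List.sorted flat (fun x => x)).foldl pv_run_step
        ((PySem.List.sorted flat (fun x => x)).headD 0, 0, (PySem.List.sorted flat (fun x => x)).headD 0, 0)).1 := by
  rw [PySem.Dict.items_counter]
  -- A side: the lex-max item of the distinct colors
  obtain ⟨x, hx⟩ := List.exists_mem_of_ne_nil flat hfne
  have hxus : x ∈ PySem.Set.ofList flat := (PySem.Set.mem_ofList flat x).mpr hx
  obtain ⟨u, us', hus⟩ := List.exists_cons_of_ne_nil (List.ne_nil_of_mem hxus)
  have husmem : ∀ k, k ∈ PySem.Set.ofList flat ↔ k ∈ flat := fun k => PySem.Set.mem_ofList flat k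
  rw [hus] at husmem ⊢
  simp only [List.map_cons]
  obtain ⟨m, hm, hmem, hall⟩ := pv_max2_spec (fun kv : Int × Int => kv.2) (fun kv : Int × Int => -kv.1)
    ((fun k => (k, (List.count k flat : Int))) u) (us'.map (fun k => (k, (List.count k flat : Int))))
  simp only at hm hmem hall
  rw [show ((u, (List.count u flat : Int)) :: List.map (fun k => (k, (List.count k flat : Int))) us')
        = List.map (fun k => (k, (List.count k flat : Int))) (u :: us') from rfl] at hm hmem hall
  obtain ⟨cA, hcA, rfl⟩ := List.mem_map.mp hmem
  rw [List.map_cons] at hm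
  rw [hm]
  simp only [Option.getD_some]
  -- B side: the run-scan over the sorted colors
  have hp : (PySem.List.sorted flat (fun x => x)).Pairwise (· ≤ ·) :=
    PySem.List.sorted_pairwise flat (fun x => x)
  have hsne : PySem.List.sorted flat (fun x => x) ≠ [] := by
    rw [Ne, PySem.List.sorted_eq_nil_iff]; exact hfne
  have hcount : ∀ d : Int, (PySem.List.sorted flat (fun x => x)).count d = flat.count d :=
    fun d => (PySem.List.sorted_perm flat (fun x => x) false).count_eq d
  obtain ⟨b, n, rv, rl, heq, _, _, _, hbmem, hn, _, hall2⟩ :=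
    pv_run_spec (PySem.List.sorted flat (fun x => x)) ((PySem.List.sorted flat (fun x => x)).headD 0) hp hsne
  rw [heq]
  -- combine: the two winners coincide
  have hbflat : b ∈ flat := (PySem.List.mem_sorted _ _ _ _).mp hbmem
  have hcAflat : cA ∈ flat := (husmem cA).mp hcA
  have hA_at_b := hall ((fun k => (k, (List.count k flat : Int))) b)
    (List.mem_map_of_mem ((husmem b).mpr hbflat))
  simp only at hA_at_b
  have hB_at_cA := hall2 cA ((PySem.List.mem_sorted _ _ _ _).mpr hcAflat)
  rw [hcount cA] at hB_at_cA
  rw [hcount b] at hn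
  obtain ⟨hle, htie⟩ := hB_at_cA
  show cA = b
  rcases hA_at_b with hlt | ⟨heq2, hle2⟩
  · omega
  · have hba : b ≤ cA := htie (by omega)
    omega

-- edge branch: A's first-max over Counter items = B's max(edge, key=edge.count)
lemma pv_edge_color (edge : List Int) (hne : edge ≠ []) (mcc : Int) :
    (if ((PySem.List.max? (PySem.Dict.counter edge).items (fun kv => kv.2)).getD (0, 0)).1 = mcc
     then mcc
     else ((PySem.List.max? (PySem.Dict.counter edge).items (fun kv => kv.2)).getD (0, 0)).1)
    = (PySem.List.max? edge (fun c => (edge.count c : Int))).getD 0 := by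
  rw [PySem.Dict.items_counter]
  rw [pv_max?_map' (fun k => (k, (List.count k edge : Int))) (fun kv => kv.2)]
  simp only
  rw [pv_max?_ofList (fun k => (List.count k edge : Int)) edge]
  obtain ⟨m, hm⟩ : ∃ m, PySem.List.max? edge (fun k => (List.count k edge : Int)) = some m := by
    cases h : PySem.List.max? edge (fun k => (List.count k edge : Int)) with
    | none => exact absurd ((PySem.List.max?_eq_none_iff _ _).mp h) hne
    | some m => exact ⟨m, rfl⟩
  rw [hm]
  simp only [Option.map_some, Option.getD_some]
  split_ifs with h
  · exact h.symm
  · rfl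

lemma pv_edges_eq (r0 : List Int) (rest : List (List Int)) (h0 : r0 ≠ []) :
    pv_get_edge_colors (r0 :: rest)
    = (r0 :: rest).foldl (fun acc row =>
          let acc := acc ++ [PySem.List.pyGetD row 0 0]
          if (r0.length : Int) > 1 then acc ++ [PySem.List.pyGetD row ((r0.length : Int) - 1) 0] else acc)
        (r0 ++ (if (((r0 :: rest).length : Int)) > 1 then PySem.List.pyGetD (r0 :: rest) (-1) [] else [])) := by
  have hemp : pv_is_empty_grid (r0 :: rest) = false := by simp [pv_is_empty_grid, h0]
  unfold pv_get_edge_colors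
  rw [hemp]
  simp only [Bool.false_eq_true, if_false, pv_get_grid_size, hemp, List.headD_cons, List.nil_append]
  rw [show ((r0 :: rest).length : Int) = PySem.List.len (r0 :: rest) from rfl]
  rw [PySem.List.foldl_pyRange_pyGetD (r0 :: rest) [] (pv_edge_row_step (r0.length : Int)) _ (le_refl 0)]
  rw [show pv_edge_row_step (r0.length : Int) = (fun acc row =>
          let acc := acc ++ [PySem.List.pyGetD row 0 0]
          if (r0.length : Int) > 1 then acc ++ [PySem.List.pyGetD row ((r0.length : Int) - 1) 0] else acc) from rfl]
  simp only [Int.toNat_zero, List.drop_zero]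
  congr 1
  rw [show PySem.List.len (r0 :: rest) = ((r0 :: rest).length : Int) from rfl]
  split_ifs with h
  · rw [pv_last_idx _ _ (by simp)]
  · simp

lemma pv_edge_ne (w : Int) : ∀ (rows : List (List Int)) (acc : List Int), acc ≠ [] →
    rows.foldl (fun acc row =>
      let acc := acc ++ [PySem.List.pyGetD row 0 0]
      if w > 1 then acc ++ [PySem.List.pyGetD row (w - 1) 0] else acc) acc ≠ [] := by
  intro rows
  induction rows with
  | nil => intro acc h; exact h
  | cons r t ih =>
    intro acc h
    simp only [List.foldl_cons]
    apply ih
    split_ifs <;> simp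

-- ===== VERDICT =====
theorem get_background_color_spec : Claim_equal_get_background_color := by
  intro grid ueh hdom hpre
  unfold Spec_get_background_color get_background_color get_background_color_alt
  cases grid with
  | nil => simp [pv_is_empty_grid]
  | cons r0 rest =>
    by_cases h0 : r0 = []
    · subst h0; simp [pv_is_empty_grid]
    · have hemp : pv_is_empty_grid (r0 :: rest) = false := by simp [pv_is_empty_grid, h0]
      have hfne := pv_flat_ne (rest := rest) h0
      have h0' : r0.isEmpty = false := by simp [h0]
      rw [hemp]
      simp only [Bool.false_eq_true, if_false, h0']
      rw [if_neg (by simpa [List.isEmpty_iff] using hfne)]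
      cases ueh with
      | false =>
        simp only [Bool.false_eq_true, if_false]
        exact pv_main_color _ hfne
      | true =>
        simp only [if_true]
        rw [pv_edges_eq r0 rest h0]
        have hne : (r0 :: rest).foldl (fun acc row =>
              let acc := acc ++ [PySem.List.pyGetD row 0 0]
              if (r0.length : Int) > 1 then acc ++ [PySem.List.pyGetD row ((r0.length : Int) - 1) 0] else acc)
            (r0 ++ (if (((r0 :: rest).length : Int)) > 1 then PySem.List.pyGetD (r0 :: rest) (-1) [] else [])) ≠ [] := by
          apply pv_edge_ne
          cases r0 with
          | nil => exact absurd rfl h0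
          | cons a t => simp
        rw [if_pos (by simpa [List.isEmpty_iff] using hne)]
        exact pv_edge_color _ hne _
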